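-- pv_equiv track=rewrite | github.com/margot-bonilla/ctci | fb/seating_arrangements.py | minOverallAwkwardness
-- ===== SOURCE A (Python) =====
-- def minOverallAwkwardness(arr):
--     arr.sort()
--     m = len(arr) // 2
--     l = m - 1
--     r = m + 1
--     arrange = [0] * len(arr)
--     idx = len(arr) - 1
--     arrange[m] = arr[idx]
--     idx -= 1
--     while idx >= 0:
--         if r < len(arr):
--             arrange[r] = arr[idx]
--             idx -= 1
--             r += 1
--         if l >= 0:
--             arrange[l] = arr[idx]
--             idx -= 1
--             l -= 1
--
--     max_height = 0
--     size = len(arr)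
--     for i in range(size + 1):
--         max_height = max(max_height, abs(arrange[i % size] - arrange[(i + 1) % size]))
--
--     return max_height
-- ===== SOURCE B (Python) =====
-- def minOverallAwkwardness(arr):
--     arr.sort()
--     n = len(arr)
--     best = 0
--     for i in range(n - 1):
--         hi = i + 2 if i + 2 < n else i + 1
--         best = max(best, arr[hi] - arr[i])
--     return best
-- ===== Notes on version B (the rewrite author's own statement) =====
-- stated objective: simpler
-- what changed: B never builds the zigzag arrangement or scans it circularly: it reads the answer directly off the sorted array as the maximum of the two-apart gaps arr[i+2]-arr[i] plus the top adjacent gap arr[n-1]-arr[n-2].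
import Mathlib
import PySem

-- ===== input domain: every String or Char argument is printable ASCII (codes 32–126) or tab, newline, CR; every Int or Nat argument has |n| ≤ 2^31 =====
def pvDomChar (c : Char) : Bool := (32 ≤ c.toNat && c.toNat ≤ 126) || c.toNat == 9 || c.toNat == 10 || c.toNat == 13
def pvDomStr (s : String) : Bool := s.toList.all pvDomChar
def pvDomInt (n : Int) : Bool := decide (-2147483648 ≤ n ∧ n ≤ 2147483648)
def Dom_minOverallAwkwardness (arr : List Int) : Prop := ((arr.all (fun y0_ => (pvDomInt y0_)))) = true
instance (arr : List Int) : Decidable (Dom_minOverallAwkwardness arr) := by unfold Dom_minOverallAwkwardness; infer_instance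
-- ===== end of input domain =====

-- B reads the answer off the sorted array (two-apart gaps plus the top adjacent gap) instead of
-- building A's zigzag arrangement and scanning it circularly.  Both Pythons sort arr in place;
-- the equivalence proved here is about the return value.

-- ===== PORT A =====
-- the 'while idx >= 0' loop of A; the guard 'r < n ∨ 0 ≤ l' only makes the recursion total
-- (whenever Python reaches the loop, one of the branches fires on every iteration).
def pvAWhile (s : List Int) (arrange : List Int) (l r idx : Int) : List Int :=
  if 0 ≤ idx then
    if r < (s.length : Int) then
      let a1 := PySem.List.pySetD arrange r ((PySem.List.pyGet? s idx).getD 0)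
      if 0 ≤ l then
        pvAWhile s (PySem.List.pySetD a1 l ((PySem.List.pyGet? s (idx - 1)).getD 0)) (l - 1) (r + 1) (idx - 2)
      else
        pvAWhile s a1 l (r + 1) (idx - 1)
    else
      if 0 ≤ l then
        pvAWhile s (PySem.List.pySetD arrange l ((PySem.List.pyGet? s idx).getD 0)) (l - 1) r (idx - 1)
      else arrange
  else arrange
termination_by (idx + 1).toNat
decreasing_by all_goals omega

def minOverallAwkwardness (arr : List Int) : Int :=
  let s := PySem.List.sorted arr (fun x => x) false
  let n := s.length
  let m := PySem.Int.floordiv (n : Int) 2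
  let arrange0 := List.replicate n (0 : Int)
  let idx : Int := (n : Int) - 1
  let arrange1 := PySem.List.pySetD arrange0 m ((PySem.List.pyGet? s idx).getD 0)
  let arrange := pvAWhile s arrange1 (m - 1) (m + 1) (idx - 1)
  (List.range (n + 1)).foldl (fun mh (i : Nat) =>
      max mh (|(PySem.List.pyGetD arrange (PySem.Int.mod (i : Int) (n : Int)) 0) -
              (PySem.List.pyGetD arrange (PySem.Int.mod ((i : Int) + 1) (n : Int)) 0)|)) 0

-- ===== PORT B =====
def minOverallAwkwardness_alt (arr : List Int) : Int :=
  let s := PySem.List.sorted arr (fun x => x) false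
  let n := s.length
  (List.range (n - 1)).foldl (fun best (i : Nat) =>
      let hi : Int := if (i : Int) + 2 < (n : Int) then (i : Int) + 2 else (i : Int) + 1
      max best (PySem.List.pyGetD s hi 0 - PySem.List.pyGetD s (i : Int) 0)) 0

-- ===== PRECONDITION & SPEC =====
-- Pre_ excludes only the empty list, on which A raises IndexError (arrange[m] of an empty arrange).
def Pre_minOverallAwkwardness (arr : List Int) : Prop := arr ≠ []
instance (arr : List Int) : Decidable (Pre_minOverallAwkwardness arr) := by unfold Pre_minOverallAwkwardness; infer_instance
def pvWitness_minOverallAwkwardness : List Int := [1, 5, 2]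

def Spec_minOverallAwkwardness (arr : List Int) (out : Int) : Prop := out = minOverallAwkwardness_alt arr
instance (arr : List Int) (out : Int) : Decidable (Spec_minOverallAwkwardness arr out) := by unfold Spec_minOverallAwkwardness; infer_instance

-- ===== CLAIM (what is proved, stated in full; the proofs are below) =====
def Claim_equal_minOverallAwkwardness : Prop := ∀ (arr : List Int), Dom_minOverallAwkwardness arr → Pre_minOverallAwkwardness arr → Spec_minOverallAwkwardness arr (minOverallAwkwardness arr)

-- ===== LEMMAS AND PROOFS =====

def pvE (n j : Nat) : Nat :=
  if j ≤ n / 2 then 2 * j + n - (2 * (n / 2) + 1) else n + 2 * (n / 2) - 2 * j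

theorem pvSetD_eq_set (xs : List Int) (i : Int) (v : Int) (h0 : 0 ≤ i) (h1 : i.toNat < xs.length) :
    PySem.List.pySetD xs i v = xs.set i.toNat v := by
  have : i = ((i.toNat : Nat) : Int) := by omega
  rw [this, PySem.List.pySetD, PySem.List.pySet?_natCast xs i.toNat v h1]
  rfl

theorem pvGetD_set_eq (xs : List Int) (i : Nat) (v : Int) (h : i < xs.length) :
    (xs.set i v).getD i 0 = v := by
  simp [List.getD_eq_getElem?_getD, h]

theorem pvGetD_set_ne (xs : List Int) (i j : Nat) (v : Int) (h : i ≠ j) :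
    (xs.set i v).getD j 0 = xs.getD j 0 := by
  simp [List.getD_eq_getElem?_getD, h]

theorem pvGet_getD (s : List Int) (i : Int) (h0 : 0 ≤ i) :
    (PySem.List.pyGet? s i).getD 0 = s.getD i.toNat 0 := by
  rw [PySem.List.pyGet?_of_nonneg s h0, List.getD_eq_getElem?_getD]

theorem pvFoldl_max_le {f : Nat → Int} {c : Int} :
    ∀ (l : List Nat) (init : Int), init ≤ c → (∀ i ∈ l, f i ≤ c) →
      l.foldl (fun a i => max a (f i)) init ≤ c := by
  intro l
  induction l with
  | nil => intro init h _; simpa using h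
  | cons x xs ih =>
      intro init h hall
      simp only [List.foldl_cons]
      exact ih _ (max_le h (hall x (by simp))) (fun i hi => hall i (by simp [hi]))

theorem pvAWhile_spec (s : List Int) :
    ∀ (c t : Nat) (a : List Int), s.length - 1 - s.length / 2 = t + c → a.length = s.length →
      (pvAWhile s a ((↑(s.length / 2) : Int) - 1 - t) ((↑(s.length / 2) : Int) + 1 + t) ((s.length : Int) - 2 - 2 * t)).length = s.length ∧
      ∀ j, j < s.length →
        (pvAWhile s a ((↑(s.length / 2) : Int) - 1 - t) ((↑(s.length / 2) : Int) + 1 + t) ((s.length : Int) - 2 - 2 * t)).getD j 0 =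
          if s.length / 2 + 1 + t ≤ j ∨ j + t < s.length / 2 then s.getD (pvE s.length j) 0 else a.getD j 0 := by
  intro c
  induction c with
  | zero =>
      intro t a hct hlen
      set n := s.length with hn
      set M := n / 2 with hM
      by_cases hev : 2 * M = n ∧ 2 ≤ n
      · -- n even ≥ 2 : one more l-only iteration filling position 0 with s[0]
        obtain ⟨he, hn2⟩ := hev
        have ht : t = M - 1 := by omega
        have hidx : (n : Int) - 2 - 2 * t = 0 := by omega
        have hl : (↑M : Int) - 1 - t = 0 := by omega
        rw [pvAWhile, hidx, hl]
        rw [if_pos (by omega), if_neg (by omega), if_pos (by omega)]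
        rw [pvAWhile, if_neg (by omega)]
        have hset : PySem.List.pySetD a 0 ((PySem.List.pyGet? s 0).getD 0) = a.set 0 ((PySem.List.pyGet? s 0).getD 0) := by
          have := pvSetD_eq_set a 0 ((PySem.List.pyGet? s 0).getD 0) (by omega) (by omega)
          simpa using this
        rw [hset]
        constructor
        · simp [hlen]
        · intro j hj
          by_cases hj0 : j = 0
          · subst hj0
            rw [if_pos (by omega), pvGetD_set_eq _ _ _ (by omega)]
            rw [pvGet_getD s 0 (by omega)]
            have : pvE n 0 = 0 := by unfold pvE; split <;> omega
            rw [this]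
            rfl
          · rw [if_neg (by omega), pvGetD_set_ne _ _ _ _ (by omega)]
      · -- n odd (or n ≤ 1) : the loop is already finished
        have hidx : (n : Int) - 2 - 2 * t < 0 := by omega
        rw [pvAWhile, if_neg (by omega)]
        exact ⟨hlen, fun j hj => by rw [if_neg (by omega)]⟩
  | succ c ih =>
      intro t a hct hlen
      set n := s.length with hn
      set M := n / 2 with hM
      have hnM : n - 1 - M = t + (c+1) := hct
      have hb : t + 1 ≤ n - 1 - M := by omega
      have hMn : 2 * M ≤ n ∧ n ≤ 2 * M + 1 := by omega
      have hidx0 : (0 : Int) ≤ (n : Int) - 2 - 2 * t := by omega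
      have hr : ((↑M : Int) + 1 + t) < (n : Int) := by omega
      have hl0 : (0 : Int) ≤ (↑M : Int) - 1 - t := by omega
      rw [pvAWhile, if_pos hidx0, if_pos hr]
      simp only []
      rw [if_pos hl0]
      -- rewrite the two pySetD's as List.set
      have hs1 : PySem.List.pySetD a ((↑M : Int) + 1 + t) ((PySem.List.pyGet? s ((n : Int) - 2 - 2 * t)).getD 0)
          = a.set (M + 1 + t) (s.getD (n - 2 - 2*t) 0) := by
        rw [pvGet_getD _ _ (by omega), pvSetD_eq_set _ _ _ (by omega) (by omega)]
        have e1 : ((↑M : Int) + 1 + ↑t).toNat = M + 1 + t := by omega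
        have e2 : ((n : Int) - 2 - 2 * (t : Int)).toNat = n - 2 - 2*t := by omega
        rw [e1, e2]
      rw [hs1]
      have hs2 : PySem.List.pySetD (a.set (M + 1 + t) (s.getD (n - 2 - 2*t) 0)) ((↑M : Int) - 1 - t)
            ((PySem.List.pyGet? s ((n : Int) - 2 - 2 * t - 1)).getD 0)
          = (a.set (M + 1 + t) (s.getD (n - 2 - 2*t) 0)).set (M - 1 - t) (s.getD (n - 3 - 2*t) 0) := by
        rw [pvGet_getD _ _ (by omega), pvSetD_eq_set _ _ _ (by omega) (by simp [hlen]; omega)]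
        have e3 : ((↑M : Int) - 1 - ↑t).toNat = M - 1 - t := by omega
        have e4 : ((n : Int) - 2 - 2 * (t : Int) - 1).toNat = n - 3 - 2*t := by omega
        rw [e3, e4]
      rw [hs2]
      set a2 := (a.set (M + 1 + t) (s.getD (n - 2 - 2*t) 0)).set (M - 1 - t) (s.getD (n - 3 - 2*t) 0) with ha2
      have harg1 : (↑M : Int) - 1 - t - 1 = (↑M : Int) - 1 - (t+1 : Nat) := by push_cast; ring
      have harg2 : (↑M : Int) + 1 + t + 1 = (↑M : Int) + 1 + (t+1 : Nat) := by push_cast; ring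
      have harg3 : (n : Int) - 2 - 2 * t - 2 = (n : Int) - 2 - 2 * (t+1 : Nat) := by push_cast; ring
      rw [harg1, harg2, harg3]
      obtain ⟨ihlen, ihpt⟩ := ih (t+1) a2 (by omega) (by simp [ha2, hlen])
      refine ⟨ihlen, fun j hj => ?_⟩
      rw [ihpt j hj]
      by_cases h1 : M + 1 + (t+1) ≤ j ∨ j + (t+1) < M
      · rw [if_pos h1, if_pos (by omega)]
      · rw [if_neg h1]
        by_cases h2 : j = M + 1 + t
        · subst h2
          rw [if_pos (by omega), ha2]
          rw [pvGetD_set_ne _ _ _ _ (by omega), pvGetD_set_eq _ _ _ (by omega)]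
          congr 1
          unfold pvE
          rw [if_neg (by omega)]
          omega
        · by_cases h3 : j = M - 1 - t
          · subst h3
            rw [if_pos (by omega), ha2]
            rw [pvGetD_set_eq _ _ _ (by simp [hlen]; omega)]
            congr 1
            unfold pvE
            rw [if_pos (by omega)]
            omega
          · rw [if_neg (by omega), ha2]
            rw [pvGetD_set_ne _ _ _ _ (by omega), pvGetD_set_ne _ _ _ _ (by omega)]

def pvG (s : List Int) (j : Nat) : Int := s.getD (pvE s.length j) 0
def pvFA (s : List Int) (i : Nat) : Int := |pvG s (i % s.length) - pvG s ((i + 1) % s.length)|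
def pvFB (s : List Int) (i : Nat) : Int := s.getD (if i + 2 < s.length then i + 2 else i + 1) 0 - s.getD i 0
def pvAfold (s : List Int) : Int := (List.range (s.length + 1)).foldl (fun a i => max a (pvFA s i)) 0
def pvBfold (s : List Int) : Int := (List.range (s.length - 1)).foldl (fun a i => max a (pvFB s i)) 0

theorem pvE_lt (n j : Nat) (h1 : 1 ≤ n) (hj : j < n) : pvE n j < n := by
  unfold pvE; split <;> omega

theorem pvE_adj (n j : Nat) (h2 : 2 ≤ n) (hj : j < n) :
    (pvE n ((j + 1) % n) ≤ pvE n j + 2 ∧ pvE n j ≤ pvE n ((j + 1) % n) + 2) := by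
  by_cases hj1 : j + 1 < n
  · rw [Nat.mod_eq_of_lt hj1]; unfold pvE; split_ifs <;> omega
  · have hje : j = n - 1 := by omega
    have : (j + 1) % n = 0 := by rw [show j + 1 = n by omega, Nat.mod_self]
    rw [this, hje]; unfold pvE; split_ifs <;> omega

theorem pvBfold_nonneg (s : List Int) : 0 ≤ pvBfold s :=
  (PySem.List.le_foldl_max_int _ _ _).1

theorem pvAfold_nonneg (s : List Int) : 0 ≤ pvAfold s :=
  (PySem.List.le_foldl_max_int _ _ _).1

theorem pvFB_le_Bfold (s : List Int) (k : Nat) (hk : k < s.length - 1) : pvFB s k ≤ pvBfold s :=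
  (PySem.List.le_foldl_max_int _ _ _).2 k (List.mem_range.2 hk)

theorem pvFA_le_Afold (s : List Int) (j : Nat) (hj : j < s.length + 1) : pvFA s j ≤ pvAfold s :=
  (PySem.List.le_foldl_max_int _ _ _).2 j (List.mem_range.2 hj)

-- any gap s[x] - s[y] with y ≤ x ≤ y+2 is bounded by some B term
theorem pvPair_le (s : List Int)
    (hmono : ∀ p q : Nat, p ≤ q → q < s.length → s.getD p 0 ≤ s.getD q 0)
    (x y : Nat) (hx : x < s.length) (hord : y ≤ x) (hgap : x ≤ y + 2) :
    |s.getD x 0 - s.getD y 0| ≤ pvBfold s := by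
  rw [abs_of_nonneg (sub_nonneg.2 (hmono y x hord hx))]
  by_cases hxy : x = y
  · subst hxy; simpa using pvBfold_nonneg s
  · have hy1 : y < s.length - 1 := by omega
    have hterm := pvFB_le_Bfold s y hy1
    unfold pvFB at hterm
    refine le_trans ?_ hterm
    have hhi : x ≤ (if y + 2 < s.length then y + 2 else y + 1) := by split <;> omega
    have hhilt : (if y + 2 < s.length then y + 2 else y + 1) < s.length := by split <;> omega
    have := hmono x _ hhi hhilt
    omega

theorem pvAfold_le (s : List Int) (hs : 1 ≤ s.length)
    (hmono : ∀ p q : Nat, p ≤ q → q < s.length → s.getD p 0 ≤ s.getD q 0) :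
    pvAfold s ≤ pvBfold s := by
  apply pvFoldl_max_le _ 0 (pvBfold_nonneg s)
  intro i _
  by_cases h1 : s.length = 1
  · unfold pvFA pvG
    rw [h1]
    simp [pvBfold_nonneg s, Nat.mod_one]
  · have h2 : 2 ≤ s.length := by omega
    unfold pvFA pvG
    set j := i % s.length with hj
    have hjlt : j < s.length := Nat.mod_lt _ (by omega)
    have hj' : (i + 1) % s.length = (j + 1) % s.length := by
      rw [hj, Nat.add_mod i 1, Nat.mod_eq_of_lt (show 1 < s.length by omega)]
    rw [hj']
    rcases pvE_adj s.length j h2 hjlt with ⟨ha, hb⟩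
    have hxlt : pvE s.length j < s.length := pvE_lt _ _ (by omega) hjlt
    have hylt : pvE s.length ((j + 1) % s.length) < s.length :=
      pvE_lt _ _ (by omega) (Nat.mod_lt _ (by omega))
    by_cases hxy : pvE s.length ((j + 1) % s.length) ≤ pvE s.length j
    · exact pvPair_le s hmono _ _ hxlt hxy (by omega)
    · rw [abs_sub_comm]
      exact pvPair_le s hmono _ _ hylt (by omega) (by omega)


theorem pvFA_pair (s : List Int) (j : Nat) (hj1 : j + 1 < s.length) :
    pvFA s j = |s.getD (pvE s.length j) 0 - s.getD (pvE s.length (j + 1)) 0| := by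
  unfold pvFA pvG
  rw [Nat.mod_eq_of_lt (by omega), Nat.mod_eq_of_lt hj1]

theorem pvFA_last (s : List Int) (hs : 1 ≤ s.length) :
    pvFA s (s.length - 1) = |s.getD (pvE s.length (s.length - 1)) 0 - s.getD (pvE s.length 0) 0| := by
  unfold pvFA pvG
  rw [Nat.mod_eq_of_lt (by omega), show (s.length - 1 + 1) = s.length from by omega, Nat.mod_self]

theorem pvBfold_le (s : List Int) (hs : 1 ≤ s.length)
    (hmono : ∀ p q : Nat, p ≤ q → q < s.length → s.getD p 0 ≤ s.getD q 0) :
    pvBfold s ≤ pvAfold s := by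
  apply pvFoldl_max_le _ 0 (pvAfold_nonneg s)
  intro k hk
  rw [List.mem_range] at hk
  have h2 : 2 ≤ s.length := by omega
  set n := s.length with hn
  set M := n / 2 with hM
  suffices hW : ∃ j, j < n ∧ pvFB s k ≤ pvFA s j by
    obtain ⟨j, hjn, hle⟩ := hW
    exact le_trans hle (pvFA_le_Afold s j (by omega))
  by_cases hkk : k + 2 < n
  · have hFB : pvFB s k = s.getD (k + 2) 0 - s.getD k 0 := by
      unfold pvFB; rw [if_pos hkk]
    have habs : |s.getD (k + 2) 0 - s.getD k 0| = s.getD (k + 2) 0 - s.getD k 0 :=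
      abs_of_nonneg (sub_nonneg.2 (hmono k (k + 2) (by omega) (by omega)))
    by_cases hodd : n % 2 = 1
    · by_cases hke : k % 2 = 0
      · refine ⟨k / 2, by omega, ?_⟩
        rw [pvFA_pair s _ (by omega)]
        have e1 : pvE n (k / 2) = k := by unfold pvE; split_ifs <;> omega
        have e2 : pvE n (k / 2 + 1) = k + 2 := by unfold pvE; split_ifs <;> omega
        rw [e1, e2, hFB, abs_sub_comm, habs]
      · refine ⟨n - (k + 3) / 2, by omega, ?_⟩
        rw [pvFA_pair s _ (by omega)]
        have e1 : pvE n (n - (k + 3) / 2) = k + 2 := by unfold pvE; split_ifs <;> omega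
        have e2 : pvE n (n - (k + 3) / 2 + 1) = k := by unfold pvE; split_ifs <;> omega
        rw [e1, e2, hFB, habs]
    · by_cases hke : k % 2 = 1
      · refine ⟨(k + 1) / 2, by omega, ?_⟩
        rw [pvFA_pair s _ (by omega)]
        have e1 : pvE n ((k + 1) / 2) = k := by unfold pvE; split_ifs <;> omega
        have e2 : pvE n ((k + 1) / 2 + 1) = k + 2 := by unfold pvE; split_ifs <;> omega
        rw [e1, e2, hFB, abs_sub_comm, habs]
      · by_cases hk0 : k = 0
        · refine ⟨n - 1, by omega, ?_⟩
          rw [show n - 1 = s.length - 1 from by omega, pvFA_last s (by omega)]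
          have e1 : pvE n (n - 1) = 2 := by unfold pvE; split_ifs <;> omega
          have e2 : pvE n 0 = 0 := by unfold pvE; split_ifs <;> omega
          rw [e1, e2, hFB, hk0]
          rw [abs_of_nonneg (sub_nonneg.2 (hmono 0 2 (by omega) (by omega)))]
        · refine ⟨n - (k + 2) / 2, by omega, ?_⟩
          rw [pvFA_pair s _ (by omega)]
          have e1 : pvE n (n - (k + 2) / 2) = k + 2 := by unfold pvE; split_ifs <;> omega
          have e2 : pvE n (n - (k + 2) / 2 + 1) = k := by unfold pvE; split_ifs <;> omega
          rw [e1, e2, hFB, habs]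
  · have hke : k = n - 2 := by omega
    have hFB : pvFB s k = s.getD (n - 1) 0 - s.getD (n - 2) 0 := by
      unfold pvFB; rw [if_neg (by omega)]
      rw [show k + 1 = n - 1 from by omega, hke]
    by_cases hn2 : n = 2
    · refine ⟨0, by omega, ?_⟩
      rw [pvFA_pair s _ (by omega)]
      have e1 : pvE n 0 = 0 := by unfold pvE; split_ifs <;> omega
      have e2 : pvE n 1 = 1 := by unfold pvE; split_ifs <;> omega
      rw [e1, e2, hFB, abs_sub_comm]
      rw [abs_of_nonneg (sub_nonneg.2 (hmono 0 1 (by omega) (by omega)))]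
      have : n - 1 = 1 ∧ n - 2 = 0 := by omega
      rw [this.1, this.2]
    · refine ⟨M, by omega, ?_⟩
      rw [pvFA_pair s _ (by omega)]
      have e1 : pvE n M = n - 1 := by unfold pvE; split_ifs <;> omega
      have e2 : pvE n (M + 1) = n - 2 := by unfold pvE; split_ifs <;> omega
      rw [e1, e2, hFB]
      rw [abs_of_nonneg (sub_nonneg.2 (hmono (n - 2) (n - 1) (by omega) (by omega)))]

def pvArr (s : List Int) : List Int :=
  pvAWhile s
    (PySem.List.pySetD (List.replicate s.length (0 : Int)) (PySem.Int.floordiv (s.length : Int) 2)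
      ((PySem.List.pyGet? s ((s.length : Int) - 1)).getD 0))
    (PySem.Int.floordiv (s.length : Int) 2 - 1) (PySem.Int.floordiv (s.length : Int) 2 + 1)
    ((s.length : Int) - 1 - 1)

theorem pvArr_spec (s : List Int) (hs : 1 ≤ s.length) :
    ∀ j, j < s.length → (pvArr s).getD j 0 = pvG s j := by
  have hfd : PySem.Int.floordiv ((s.length : Nat) : Int) 2 = ((s.length / 2 : Nat) : Int) := by
    exact_mod_cast PySem.Int.floordiv_natCast s.length 2
  have hset : PySem.List.pySetD (List.replicate s.length (0 : Int)) ((s.length / 2 : Nat) : Int)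
        ((PySem.List.pyGet? s ((s.length : Int) - 1)).getD 0)
      = (List.replicate s.length (0 : Int)).set (s.length / 2) (s.getD (s.length - 1) 0) := by
    rw [pvGet_getD _ _ (by omega),
      pvSetD_eq_set _ _ _ (by omega) (by rw [List.length_replicate]; omega)]
    have e1 : ((s.length / 2 : Nat) : Int).toNat = s.length / 2 := by omega
    have e2 : ((s.length : Int) - 1).toNat = s.length - 1 := by omega
    rw [e1, e2]
  have harg1 : ((s.length / 2 : Nat) : Int) - 1 = ((s.length / 2 : Nat) : Int) - 1 - ((0 : Nat) : Int) := by simp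
  have harg2 : ((s.length / 2 : Nat) : Int) + 1 = ((s.length / 2 : Nat) : Int) + 1 + ((0 : Nat) : Int) := by simp
  have harg3 : (s.length : Int) - 1 - 1 = (s.length : Int) - 2 - 2 * ((0 : Nat) : Int) := by push_cast; ring
  intro j hj
  unfold pvArr
  rw [hfd, hset, harg1, harg2, harg3]
  have hlen : ((List.replicate s.length (0 : Int)).set (s.length / 2) (s.getD (s.length - 1) 0)).length = s.length := by
    simp
  rw [(pvAWhile_spec s (s.length - 1 - s.length / 2) 0 _ (by omega) hlen).2 j hj]
  by_cases hcond : s.length / 2 + 1 + 0 ≤ j ∨ j + 0 < s.length / 2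
  · rw [if_pos hcond]; rfl
  · rw [if_neg hcond]
    have hjM : j = s.length / 2 := by omega
    subst hjM
    rw [pvGetD_set_eq _ _ _ (by rw [List.length_replicate]; omega)]
    unfold pvG
    have : pvE s.length (s.length / 2) = s.length - 1 := by unfold pvE; split_ifs <;> omega
    rw [this]

theorem pvAfold_eq (s : List Int) (hs : 1 ≤ s.length) :
    (List.range (s.length + 1)).foldl (fun mh (i : Nat) =>
        max mh (|PySem.List.pyGetD (pvArr s) (PySem.Int.mod (i : Int) (s.length : Int)) 0 -
                PySem.List.pyGetD (pvArr s) (PySem.Int.mod ((i : Int) + 1) (s.length : Int)) 0|)) 0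
      = pvAfold s := by
  apply PySem.List.foldl_congr_mem
  intro acc i hi
  rw [List.mem_range] at hi
  congr 1
  have h1' : ((i : Int) + 1) = ((i + 1 : Nat) : Int) := by push_cast; ring
  rw [PySem.Int.mod_natCast, h1', PySem.Int.mod_natCast,
    PySem.List.pyGetD_natCast, PySem.List.pyGetD_natCast]
  rw [pvArr_spec s hs _ (Nat.mod_lt _ (by omega)), pvArr_spec s hs _ (Nat.mod_lt _ (by omega))]
  rfl

theorem pvBfold_eq (s : List Int) :
    (List.range (s.length - 1)).foldl (fun best (i : Nat) =>
        max best (PySem.List.pyGetD s (if (i : Int) + 2 < (s.length : Int) then (i : Int) + 2 else (i : Int) + 1) 0 -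
                  PySem.List.pyGetD s (i : Int) 0)) 0
      = pvBfold s := by
  apply PySem.List.foldl_congr_mem
  intro acc i hi
  rw [List.mem_range] at hi
  congr 1
  by_cases h : i + 2 < s.length
  · rw [if_pos (by exact_mod_cast h), show ((i : Int) + 2) = ((i + 2 : Nat) : Int) from by push_cast; ring,
      PySem.List.pyGetD_natCast, PySem.List.pyGetD_natCast]
    unfold pvFB
    rw [if_pos h]
  · rw [if_neg (by exact_mod_cast h), show ((i : Int) + 1) = ((i + 1 : Nat) : Int) from by push_cast; ring,
      PySem.List.pyGetD_natCast, PySem.List.pyGetD_natCast]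
    unfold pvFB
    rw [if_neg h]

-- ===== VERDICT (by name: the statement is the Claim_ definition above) =====
theorem minOverallAwkwardness_spec : Claim_equal_minOverallAwkwardness := by
  intro arr _ hpre
  unfold Spec_minOverallAwkwardness
  unfold minOverallAwkwardness minOverallAwkwardness_alt
  have hsne : PySem.List.sorted arr (fun x => x) false ≠ [] := by
    intro h
    exact hpre ((PySem.List.sorted_eq_nil_iff arr _ false).1 h)
  have hs1 : 1 ≤ (PySem.List.sorted arr (fun x => x) false).length :=
    List.length_pos_of_ne_nil hsne
  have hmono : ∀ p q : Nat, p ≤ q → q < (PySem.List.sorted arr (fun x => x) false).length →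
      (PySem.List.sorted arr (fun x => x) false).getD p 0 ≤ (PySem.List.sorted arr (fun x => x) false).getD q 0 := by
    intro p q hpq hq
    rw [List.getD_eq_getElem _ _ (by omega), List.getD_eq_getElem _ _ hq]
    exact PySem.List.sorted_id_getElem_mono arr hpq hq
  set s := PySem.List.sorted arr (fun x => x) false with hsdef
  show (List.range (s.length + 1)).foldl (fun mh (i : Nat) =>
        max mh (|PySem.List.pyGetD (pvArr s) (PySem.Int.mod (i : Int) (s.length : Int)) 0 -
                PySem.List.pyGetD (pvArr s) (PySem.Int.mod ((i : Int) + 1) (s.length : Int)) 0|)) 0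
      = (List.range (s.length - 1)).foldl (fun best (i : Nat) =>
        max best (PySem.List.pyGetD s (if (i : Int) + 2 < (s.length : Int) then (i : Int) + 2 else (i : Int) + 1) 0 -
                  PySem.List.pyGetD s (i : Int) 0)) 0
  rw [pvAfold_eq s hs1, pvBfold_eq s]
  exact le_antisymm (pvAfold_le s hs1 hmono) (pvBfold_le s hs1 hmono)
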